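-- pv_equiv track=rewrite | github.com/ArunAaryan/practice_dsa | NumbersDivisibleBy7.py | numbersInRange
-- ===== SOURCE A (Python) =====
-- def numbersInRange(left, right):
--     if left >= right:
--         return None
--     res = []
--     for num in range(left, right + 1):
--         if num % 7 == 0:
--             res.append(num)
--     return sum(res)
-- ===== SOURCE B (Python) =====
-- def numbersInRange(left, right):
--     if left >= right:
--         return None
--     first = -((-left) // 7) * 7       # smallest multiple of 7 >= left
--     last = (right // 7) * 7           # largest multiple of 7 <= right
--     if first > last:
--         return 0
--     cnt = (last - first) // 7 + 1
--     return (first + last) * cnt // 2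
-- ===== Notes on version B (the rewrite author's own statement) =====
-- stated objective: faster
-- what changed: Replaced the O(right-left) loop that collects multiples of 7 into a list and sums them with the O(1) arithmetic-series formula over the first and last multiple of 7 in [left, right].
import Mathlib
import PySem

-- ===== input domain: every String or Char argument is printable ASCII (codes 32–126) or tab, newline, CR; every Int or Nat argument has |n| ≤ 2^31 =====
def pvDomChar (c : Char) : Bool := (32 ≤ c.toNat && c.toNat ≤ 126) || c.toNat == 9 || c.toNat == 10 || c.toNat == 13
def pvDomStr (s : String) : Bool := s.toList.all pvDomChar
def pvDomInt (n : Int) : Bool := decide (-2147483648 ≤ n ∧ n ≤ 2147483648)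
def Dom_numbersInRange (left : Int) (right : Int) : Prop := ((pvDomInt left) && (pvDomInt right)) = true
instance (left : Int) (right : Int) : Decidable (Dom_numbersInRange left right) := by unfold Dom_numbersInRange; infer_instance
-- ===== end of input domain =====

-- B replaces A's O(right-left) collect-and-sum loop with the O(1) arithmetic-series formula (faster, asymptotic).


-- ===== PORT A =====
def numbersInRange (left : Int) (right : Int) : Option Int :=
  if left ≥ right then none
  else
    let res : List Int :=
      (PySem.List.pyRange left (right + 1) 1).foldl
        (fun res num => if PySem.Int.mod num 7 = 0 then res ++ [num] else res) []
    some res.sum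

-- ===== PORT B =====
def numbersInRange_alt (left : Int) (right : Int) : Option Int :=
  if left ≥ right then none
  else
    let first := -(PySem.Int.floordiv (-left) 7) * 7
    let last := PySem.Int.floordiv right 7 * 7
    if first > last then some 0
    else
      let cnt := PySem.Int.floordiv (last - first) 7 + 1
      some (PySem.Int.floordiv ((first + last) * cnt) 2)

-- ===== PRECONDITION & SPEC =====
def Spec_numbersInRange (left : Int) (right : Int) (out : Option Int) : Prop := out = numbersInRange_alt left right
instance (left : Int) (right : Int) (out : Option Int) : Decidable (Spec_numbersInRange left right out) := by unfold Spec_numbersInRange; infer_instance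

-- ===== CLAIM (what is proved, stated in full; the proofs are below) =====
def Claim_equal_numbersInRange : Prop := ∀ (left : Int) (right : Int), Dom_numbersInRange left right → Spec_numbersInRange left right (numbersInRange left right)

-- ===== LEMMAS AND PROOFS =====

-- Closed form for the sum of multiples of 7 in the half-open interval [a, b), in terms of Euclidean division.
def pvCsum (a b : Int) : Int :=
  let F := -((-a) / 7) * 7
  let L := ((b - 1) / 7) * 7
  if F > L then 0
  else (F + L) * ((L - F) / 7 + 1) / 2

lemma pvCsum_nil (a b : Int) (h : b ≤ a) : pvCsum a b = 0 := by
  unfold pvCsum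
  have h1 : -((-a) / 7) * 7 > ((b - 1) / 7) * 7 := by omega
  simp only [h1, if_pos]

lemma pvCsum_step (a b : Int) (h : a < b) :
    pvCsum a b = (if a % 7 = 0 then a else 0) + pvCsum (a + 1) b := by
  unfold pvCsum
  by_cases h7 : a % 7 = 0
  · -- a is a multiple of 7: first multiple moves from a to a + 7
    have hF : -((-a) / 7) * 7 = a := by omega
    have hF' : -((-(a + 1)) / 7) * 7 = a + 7 := by omega
    set L := ((b - 1) / 7) * 7 with hL
    have hLa : a ≤ L := by omega
    have hdvd : (L - a) % 7 = 0 := by omega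
    simp only [hF, hF', if_pos h7]
    have hnot : ¬ a > L := by omega
    rw [if_neg hnot]
    by_cases h2 : a + 7 > L
    · -- L = a : the interval contains exactly one multiple
      have hLe : L = a := by omega
      rw [if_pos h2, hLe]
      have : (a + a) * ((a - a) / 7 + 1) = a * 2 := by ring_nf; omega
      rw [this, Int.mul_ediv_cancel _ (by norm_num)]
      omega
    · rw [if_neg h2]
      set k := (L - a) / 7 with hk
      have hLk : L = a + 7 * k := by omega
      have hk1 : (L - (a + 7)) / 7 = k - 1 := by omega
      have e1 : (a + L) * ((L - a) / 7 + 1) = a * 2 + (a + 7 + L) * ((k - 1) + 1) := by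
        rw [hLk]
        have h75 : (a + 7 * k - a) / 7 = k := by omega
        rw [h75]; ring
      have key : ∀ (x y : Int), (x * 2 + y) / 2 = x + y / 2 := by
        intro x y
        rw [show x * 2 + y = y + 2 * x from by ring,
          Int.add_mul_ediv_left y x (by norm_num : (2:Int) ≠ 0)]
        ring
      rw [e1, hk1, key]
  · -- a not a multiple of 7: the first multiple is unchanged
    have hF : -((-a) / 7) = -((-(a + 1)) / 7) := by omega
    simp only [hF, if_neg h7]
    ring

lemma pvSum_filter (n : Nat) : ∀ (a b : Int), (b - a).toNat = n →
    ((PySem.List.pyRange a b 1).filter (fun x => decide (PySem.Int.mod x 7 = 0))).sum = pvCsum a b := by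
  induction n with
  | zero =>
    intro a b hn
    have hba : b ≤ a := by omega
    rw [PySem.List.pyRange_one_eq_nil hba, pvCsum_nil a b hba]
    simp
  | succ m ih =>
    intro a b hn
    have hab : a < b := by omega
    rw [PySem.List.pyRange_one_cons hab]
    rw [pvCsum_step a b hab, ← ih (a + 1) b (by omega)]
    by_cases h7 : a % 7 = 0
    · simp [List.filter, h7]
    · simp [List.filter, h7]

lemma pvLoop_eq_filter (l : List Int) :
    l.foldl (fun res num => if PySem.Int.mod num 7 = 0 then res ++ [num] else res) ([] : List Int)
      = l.filter (fun x => decide (PySem.Int.mod x 7 = 0)) := by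
  have := PySem.List.foldl_append_ite_eq_filter (l := l)
    (p := fun (x : Int) => PySem.Int.mod x 7 = 0) (acc := ([] : List Int))
  simpa using this

-- ===== VERDICT (by name: the statement is the Claim_ definition above) =====
theorem numbersInRange_spec : Claim_equal_numbersInRange := by
  intro left right _
  unfold Spec_numbersInRange numbersInRange numbersInRange_alt
  by_cases hge : left ≥ right
  · simp [hge]
  · rw [if_neg hge, if_neg hge]
    simp only []
    rw [pvLoop_eq_filter, pvSum_filter ((right + 1 - left).toNat) left (right + 1) rfl]
    have e7 : ∀ x : Int, PySem.Int.floordiv x 7 = x / 7 :=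
      fun x => PySem.Int.floordiv_eq_ediv_of_pos (by norm_num)
    have e2 : ∀ x : Int, PySem.Int.floordiv x 2 = x / 2 :=
      fun x => PySem.Int.floordiv_eq_ediv_of_pos (by norm_num)
    unfold pvCsum
    simp only [e7, e2, show right + 1 - 1 = right from by ring]
    split_ifs <;> rfl
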